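-- pv_equiv track=rewrite | github.com/jerrywbirnbaum/chess-bitboard | generate_rays.py | generate_straight_rays
-- ===== SOURCE A (Python) =====
-- from itertools import chain
--
-- def generate_straight_rays(rays, start_row, start_col):
--     index = start_row * 8 + start_col
--     rays[index] = {}
--
--     board = [[0] * 8 for _ in range(8)]
--     count_row = start_row
--     count_col = start_col
--
--     # north
--     while count_row >= 0:
--         board[count_row][count_col] = 1
--         count_row -= 1
--     board[start_row][start_col] = 0
--
--     flattented_board = list(chain.from_iterable(board))
--     out_board = ""
--     for num in flattented_board:
--         out_board += str(num)
--
--     rays[index]["N"] = int(out_board, 2)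
--
--     # South
--     board = [[0] * 8 for _ in range(8)]
--     count_row = start_row
--     count_col = start_col
--     while count_row < 8:
--         board[count_row][count_col] = 1
--         count_row += 1
--     board[start_row][start_col] = 0
--
--     flattented_board = list(chain.from_iterable(board))
--     out_board = ""
--     for num in flattented_board:
--         out_board += str(num)
--     rays[index]["S"] = int(out_board, 2)
--
--     # west
--     board = [[0] * 8 for _ in range(8)]
--     count_row = start_row
--     count_col = start_col
--     while count_col >= 0:
--         board[count_row][count_col] = 1
--         count_col -= 1
--     board[start_row][start_col] = 0
--
--     flattented_board = list(chain.from_iterable(board))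
--     out_board = ""
--     for num in flattented_board:
--         out_board += str(num)
--     rays[index]["W"] = int(out_board, 2)
--
--     # east
--     board = [[0] * 8 for _ in range(8)]
--     count_row = start_row
--     count_col = start_col
--     while count_col < 8:
--         board[count_row][count_col] = 1
--         count_col += 1
--     board[start_row][start_col] = 0
--
--     flattented_board = list(chain.from_iterable(board))
--     out_board = ""
--     for num in flattented_board:
--         out_board += str(num)
--     rays[index]["E"] = int(out_board, 2)
--
--     return rays
-- ===== SOURCE B (Python) =====
-- def square_index(row, col):
--     if not (0 <= row < 8 and 0 <= col < 8):
--         raise ValueError("off-board square (%r, %r)" % (row, col))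
--     return row * 8 + col
--
-- def generate_straight_rays(rays, start_row, start_col):
--     index = square_index(start_row, start_col)
--     def mask(cells):
--         m = 0
--         for r, c in cells:
--             m |= 1 << (63 - (r * 8 + c))
--         return m
--     rays[index] = {
--         "N": mask((r, start_col) for r in range(start_row)),
--         "S": mask((r, start_col) for r in range(start_row + 1, 8)),
--         "W": mask((start_row, c) for c in range(start_col)),
--         "E": mask((start_row, c) for c in range(start_col + 1, 8)),
--     }
--     return rays
-- ===== Notes on version B (the rewrite author's own statement) =====
-- stated objective: idiomatic
-- what changed: B drops A's four 8x8-grid / flatten / binary-string / int(s,2) pipelines and instead validates the square and accumulates each direction's bitboard directly with mask |= 1 << (63 - (r*8+c)) over the ray squares. Pre_ restricts to on-board squares 0..7: on off-board squares with a negative coordinate A returns masks scrambled by Python's negative-index wraparound (no caller would specify them) while B raises ValueError.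
-- outside the precondition, e.g. on generate_straight_rays({}, 7, -1): A returns {55: {'N': 72340172838076672, 'S': 0, 'W': 0, 'E': 254}}, B raises
import Mathlib
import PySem

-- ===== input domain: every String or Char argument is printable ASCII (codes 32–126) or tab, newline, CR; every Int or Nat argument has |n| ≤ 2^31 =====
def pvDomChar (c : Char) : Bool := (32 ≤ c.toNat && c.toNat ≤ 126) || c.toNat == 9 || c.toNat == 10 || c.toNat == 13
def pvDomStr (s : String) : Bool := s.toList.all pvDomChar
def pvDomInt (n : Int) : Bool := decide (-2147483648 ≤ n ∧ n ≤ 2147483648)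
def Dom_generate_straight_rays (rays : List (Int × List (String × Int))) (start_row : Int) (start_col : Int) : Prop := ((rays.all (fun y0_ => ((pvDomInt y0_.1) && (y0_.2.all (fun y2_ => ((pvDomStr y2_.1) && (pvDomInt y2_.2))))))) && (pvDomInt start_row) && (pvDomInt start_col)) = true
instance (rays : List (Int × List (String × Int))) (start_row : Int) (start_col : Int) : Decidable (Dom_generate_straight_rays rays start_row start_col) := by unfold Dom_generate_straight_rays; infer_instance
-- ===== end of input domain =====

-- B replaces A's four board-grid/flatten/binary-string pipelines by direct bit-mask
-- accumulation over the ray squares (idiomatic bitboard style). Both A and B mutate the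
-- argument dict in place in Python; the equivalence proved here is about the return value.

-- Shared dict primitives (Python dict semantics on association lists):
-- d[k] = v : overwrite in place if k present, else append.
def pyDictInsert {κ ν : Type} [BEq κ] (d : List (κ × ν)) (k : κ) (v : ν) : List (κ × ν) :=
  match d with
  | [] => [(k, v)]
  | (k', v') :: rest => if k' == k then (k, v) :: rest else (k', v') :: pyDictInsert rest k v

-- mutation of the value stored at an existing key k (d[k][...] = ...).
def pyDictModify {κ ν : Type} [BEq κ] (d : List (κ × ν)) (k : κ) (f : ν → ν) : List (κ × ν) :=
  match d with
  | [] => []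
  | (k', v') :: rest => if k' == k then (k', f v') :: rest else (k', v') :: pyDictModify rest k f

-- ===== PORT A =====
-- board[r][c] = v with Python's negative-index wraparound; exact for -8 ≤ r, c < 8
-- (every index reached inside Pre_ is in that range; outside it Python raises IndexError)
def pvSetCell (b : List (List Int)) (r c : Int) (v : Int) : List (List Int) :=
  b.modify (if r < 0 then r + 8 else r).toNat
    (fun row => row.set (if c < 0 then c + 8 else c).toNat v)

def pvZeroBoard : List (List Int) := List.replicate 8 (List.replicate 8 0)

-- while count_row >= 0: board[count_row][count_col] = 1; count_row -= 1
-- (fuel = the exact number of iterations, (r+1).toNat; it only makes the loop total)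
def pvNorthAux : Nat → List (List Int) → Int → Int → List (List Int)
  | 0, b, _, _ => b
  | n + 1, b, r, c => if 0 ≤ r then pvNorthAux n (pvSetCell b r c 1) (r - 1) c else b
def pvNorthLoop (b : List (List Int)) (r c : Int) : List (List Int) := pvNorthAux (r + 1).toNat b r c

-- while count_row < 8: board[count_row][count_col] = 1; count_row += 1
def pvSouthAux : Nat → List (List Int) → Int → Int → List (List Int)
  | 0, b, _, _ => b
  | n + 1, b, r, c => if r < 8 then pvSouthAux n (pvSetCell b r c 1) (r + 1) c else b
def pvSouthLoop (b : List (List Int)) (r c : Int) : List (List Int) := pvSouthAux (8 - r).toNat b r c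

-- while count_col >= 0: board[count_row][count_col] = 1; count_col -= 1
def pvWestAux : Nat → List (List Int) → Int → Int → List (List Int)
  | 0, b, _, _ => b
  | n + 1, b, r, c => if 0 ≤ c then pvWestAux n (pvSetCell b r c 1) r (c - 1) else b
def pvWestLoop (b : List (List Int)) (r c : Int) : List (List Int) := pvWestAux (c + 1).toNat b r c

-- while count_col < 8: board[count_row][count_col] = 1; count_col += 1
def pvEastAux : Nat → List (List Int) → Int → Int → List (List Int)
  | 0, b, _, _ => b
  | n + 1, b, r, c => if c < 8 then pvEastAux n (pvSetCell b r c 1) r (c + 1) else b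
def pvEastLoop (b : List (List Int)) (r c : Int) : List (List Int) := pvEastAux (8 - c).toNat b r c

-- flatten + "out_board += str(num)"; the string is carried as List Char (Lean's own
-- String.append is kernel-opaque; PySem strings are defined on List Char), same characters
def pvBoardStr (b : List (List Int)) : List Char :=
  b.flatten.foldl (fun s n => s ++ (PySem.Int.toStr n).toList) []

-- int(s, 2); hand-ported, exact on strings of '0'/'1' digits (which out_board always is)
def pvParseBin (s : List Char) : Int :=
  s.foldl (fun acc ch => acc * 2 + (if ch == '1' then 1 else 0)) 0

def generate_straight_rays (rays : List (Int × List (String × Int))) (start_row : Int) (start_col : Int) : List (Int × List (String × Int)) :=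
  let index := start_row * 8 + start_col
  let rays1 := pyDictInsert rays index []
  -- north
  let nN := pvParseBin (pvBoardStr (pvSetCell (pvNorthLoop pvZeroBoard start_row start_col) start_row start_col 0))
  let rays2 := pyDictModify rays1 index (fun m => pyDictInsert m "N" nN)
  -- south
  let nS := pvParseBin (pvBoardStr (pvSetCell (pvSouthLoop pvZeroBoard start_row start_col) start_row start_col 0))
  let rays3 := pyDictModify rays2 index (fun m => pyDictInsert m "S" nS)
  -- west
  let nW := pvParseBin (pvBoardStr (pvSetCell (pvWestLoop pvZeroBoard start_row start_col) start_row start_col 0))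
  let rays4 := pyDictModify rays3 index (fun m => pyDictInsert m "W" nW)
  -- east
  let nE := pvParseBin (pvBoardStr (pvSetCell (pvEastLoop pvZeroBoard start_row start_col) start_row start_col 0))
  pyDictModify rays4 index (fun m => pyDictInsert m "E" nE)

-- ===== PORT B =====
-- m |= 1 << (63 - (r*8 + c)); the .toNat is exact since inside Pre_ the shift amount is ≥ 0
def pvMask (cells : List (Int × Int)) : Int :=
  cells.foldl (fun m rc => Int.lor m (Int.shiftLeft 1 (63 - (rc.1 * 8 + rc.2)).toNat)) 0

def generate_straight_rays_alt (rays : List (Int × List (String × Int))) (start_row : Int) (start_col : Int) : List (Int × List (String × Int)) :=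
  -- square_index: Python B raises ValueError off-board; that branch lies outside Pre_,
  -- where nothing is claimed — the port returns the argument unchanged there.
  if ¬ (0 ≤ start_row ∧ start_row < 8 ∧ 0 ≤ start_col ∧ start_col < 8) then rays else
  let index := start_row * 8 + start_col
  pyDictInsert rays index
    [ ("N", pvMask ((PySem.List.pyRange 0 start_row 1).map (fun r => (r, start_col)))),
      ("S", pvMask ((PySem.List.pyRange (start_row + 1) 8 1).map (fun r => (r, start_col)))),
      ("W", pvMask ((PySem.List.pyRange 0 start_col 1).map (fun c => (start_row, c)))),
      ("E", pvMask ((PySem.List.pyRange (start_col + 1) 8 1).map (fun c => (start_row, c)))) ]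

-- ===== PRECONDITION & SPEC =====
-- Pre_ restricts to the function's natural domain, the on-board squares 0 ≤ row, col < 8.
-- It excludes (i) coordinates ≥ 8 or < -8, where A raises IndexError, and (ii) off-board
-- squares with a negative start_row or start_col — squares that do not exist, where A
-- returns masks scrambled by Python's negative-index wraparound that no caller would
-- specify, while B's square validation raises ValueError.
def Pre_generate_straight_rays (rays : List (Int × List (String × Int))) (start_row : Int) (start_col : Int) : Prop :=
  0 ≤ start_row ∧ start_row < 8 ∧ 0 ≤ start_col ∧ start_col < 8
instance (rays : List (Int × List (String × Int))) (start_row : Int) (start_col : Int) : Decidable (Pre_generate_straight_rays rays start_row start_col) := by unfold Pre_generate_straight_rays; infer_instance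

def pvWitness_generate_straight_rays : (List (Int × List (String × Int))) × Int × Int := ([(10, [("N", 5)])], 3, 4)

def Spec_generate_straight_rays (rays : List (Int × List (String × Int))) (start_row : Int) (start_col : Int) (out : List (Int × List (String × Int))) : Prop := out = generate_straight_rays_alt rays start_row start_col
instance (rays : List (Int × List (String × Int))) (start_row : Int) (start_col : Int) (out : List (Int × List (String × Int))) : Decidable (Spec_generate_straight_rays rays start_row start_col out) := by unfold Spec_generate_straight_rays; infer_instance

-- ===== CLAIM (what is proved, stated in full; the proofs are below) =====
def Claim_equal_generate_straight_rays : Prop := ∀ (rays : List (Int × List (String × Int))) (start_row : Int) (start_col : Int), Dom_generate_straight_rays rays start_row start_col → Pre_generate_straight_rays rays start_row start_col → Spec_generate_straight_rays rays start_row start_col (generate_straight_rays rays start_row start_col)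

-- ===== LEMMAS AND PROOFS =====

-- the four direction values of A as standalone functions of the square
def pvAN (r c : Int) : Int := pvParseBin (pvBoardStr (pvSetCell (pvNorthLoop pvZeroBoard r c) r c 0))
def pvAS (r c : Int) : Int := pvParseBin (pvBoardStr (pvSetCell (pvSouthLoop pvZeroBoard r c) r c 0))
def pvAW (r c : Int) : Int := pvParseBin (pvBoardStr (pvSetCell (pvWestLoop pvZeroBoard r c) r c 0))
def pvAE (r c : Int) : Int := pvParseBin (pvBoardStr (pvSetCell (pvEastLoop pvZeroBoard r c) r c 0))

-- and B's
def pvBN (r c : Int) : Int := pvMask ((PySem.List.pyRange 0 r 1).map (fun i => (i, c)))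
def pvBS (r c : Int) : Int := pvMask ((PySem.List.pyRange (r + 1) 8 1).map (fun i => (i, c)))
def pvBW (r c : Int) : Int := pvMask ((PySem.List.pyRange 0 c 1).map (fun j => (r, j)))
def pvBE (r c : Int) : Int := pvMask ((PySem.List.pyRange (c + 1) 8 1).map (fun j => (r, j)))

theorem pyDictModify_insert {κ ν : Type} [BEq κ] [LawfulBEq κ] (d : List (κ × ν)) (k : κ) (v : ν) (f : ν → ν) :
    pyDictModify (pyDictInsert d k v) k f = pyDictInsert d k (f v) := by
  induction d with
  | nil => simp [pyDictInsert, pyDictModify]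
  | cons p rest ih =>
    obtain ⟨k', v'⟩ := p
    by_cases h : (k' == k) = true
    · simp [pyDictInsert, pyDictModify, h]
    · simp [pyDictInsert, pyDictModify, h, ih]

theorem A_closed (rays : List (Int × List (String × Int))) (r c : Int) :
    generate_straight_rays rays r c =
      pyDictInsert rays (r * 8 + c) [("N", pvAN r c), ("S", pvAS r c), ("W", pvAW r c), ("E", pvAE r c)] := by
  show pyDictModify (pyDictModify (pyDictModify (pyDictModify (pyDictInsert rays (r * 8 + c) [])
      (r * 8 + c) (fun m => pyDictInsert m "N" (pvAN r c))) (r * 8 + c) (fun m => pyDictInsert m "S" (pvAS r c)))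
      (r * 8 + c) (fun m => pyDictInsert m "W" (pvAW r c))) (r * 8 + c) (fun m => pyDictInsert m "E" (pvAE r c)) = _
  rw [pyDictModify_insert, pyDictModify_insert, pyDictModify_insert, pyDictModify_insert]
  simp [pyDictInsert]

theorem B_closed (rays : List (Int × List (String × Int))) (r c : Int)
    (h0 : 0 ≤ r) (h1 : r < 8) (h2 : 0 ≤ c) (h3 : c < 8) :
    generate_straight_rays_alt rays r c =
      pyDictInsert rays (r * 8 + c) [("N", pvBN r c), ("S", pvBS r c), ("W", pvBW r c), ("E", pvBE r c)] := by
  unfold generate_straight_rays_alt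
  rw [if_neg (by omega)]
  rfl

set_option maxRecDepth 16384 in
set_option maxHeartbeats 4000000 in
theorem vals_eq (r c : Int) (h0 : 0 ≤ r) (h1 : r < 8) (h2 : 0 ≤ c) (h3 : c < 8) :
    pvAN r c = pvBN r c ∧ pvAS r c = pvBS r c ∧ pvAW r c = pvBW r c ∧ pvAE r c = pvBE r c := by
  interval_cases r <;> interval_cases c <;> decide

-- ===== VERDICT (by name: the statement is the Claim_ definition above) =====
theorem generate_straight_rays_spec : Claim_equal_generate_straight_rays := by
  intro rays r c _ hpre
  unfold Spec_generate_straight_rays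
  obtain ⟨h0, h1, h2, h3⟩ := hpre
  obtain ⟨eN, eS, eW, eE⟩ := vals_eq r c h0 h1 h2 h3
  rw [A_closed, B_closed rays r c h0 h1 h2 h3, eN, eS, eW, eE]
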